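-- pv_equiv track=rewrite | github.com/PandABlocks/PandABlocks-FPGA | .github/scripts/Group_Tests.py | split_modules
-- ===== SOURCE A (Python) =====
-- def split_modules(modules, num_jobs):
--     modules.sort(key=lambda x: x[1], reverse=True)
--     jobs = [[] for _ in range(num_jobs)]
--     for module, count in modules:
--         min_sum_job_idx = min(
--             range(num_jobs), key=lambda i: sum(subset[1] for subset in jobs[i])
--         )
--         jobs[min_sum_job_idx].append([module, count])
--     return jobs
-- ===== SOURCE B (Python) =====
-- def _insert(queue, item):
--     # linear ordered insert keeping queue sorted ascending (lexicographic tuples)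
--     for pos in range(len(queue)):
--         if item < queue[pos]:
--             return queue[:pos] + [item] + queue[pos:]
--     return queue + [item]
--
--
-- def split_modules(modules, num_jobs):
--     modules.sort(key=lambda x: x[1], reverse=True)
--     jobs = [[] for _ in range(num_jobs)]
--     # priority queue: a sorted list of (running_sum, job_index) pairs;
--     # the lightest job (ties: lowest index) is always at the front.
--     queue = [(0, i) for i in range(num_jobs)]
--     for module, count in modules:
--         s, i = queue[0]
--         queue = _insert(queue[1:], (s + count, i))
--         jobs[i].append([module, count])
--     return jobs
-- ===== Notes on version B (the rewrite author's own statement) =====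
-- stated objective: faster
-- what changed: B replaces A's per-module rescan (min over all jobs, each recomputing its sum from the assigned module lists) by a priority queue kept as a sorted list of (running_sum, job_index) pairs: the target job is popped from the front in O(1) and re-inserted with its updated sum by an ordered insert, so no per-step minimum scan or sum recomputation remains.
import Mathlib
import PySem

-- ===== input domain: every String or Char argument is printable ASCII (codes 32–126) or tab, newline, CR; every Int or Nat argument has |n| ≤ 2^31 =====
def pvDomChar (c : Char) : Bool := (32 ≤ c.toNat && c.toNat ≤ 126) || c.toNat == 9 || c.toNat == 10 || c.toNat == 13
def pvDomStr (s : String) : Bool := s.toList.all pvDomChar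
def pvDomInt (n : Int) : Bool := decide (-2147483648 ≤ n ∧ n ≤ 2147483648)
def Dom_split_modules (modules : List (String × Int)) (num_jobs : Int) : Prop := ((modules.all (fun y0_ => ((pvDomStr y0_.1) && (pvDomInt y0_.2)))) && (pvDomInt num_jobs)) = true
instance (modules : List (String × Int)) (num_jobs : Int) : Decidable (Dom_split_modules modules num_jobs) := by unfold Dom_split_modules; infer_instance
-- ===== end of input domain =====

-- B replaces A's per-step rescan of every job (recomputing each job's sum to find the minimum)
-- by a priority queue kept as a sorted list of (running_sum, job_index) pairs: pop the front,
-- ordered-insert the updated pair (objective: faster). Both Pythons sort `modules` in place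
-- (same mutation); the claim is about the return value.


-- ===== PORT A =====
-- sum(subset[1] for subset in job)
def pvSumSnd (job : List (String × Int)) : Int :=
  job.foldl (fun s q => s + q.2) 0

-- the body of A's for-loop: pick min(range(num_jobs), key=...), append there
def pvStepA (num_jobs : Int) (jobs : List (List (String × Int))) (p : String × Int) :
    List (List (String × Int)) :=
  match PySem.List.min? (PySem.List.pyRange 0 num_jobs 1)
      (fun i => pvSumSnd (PySem.List.pyGetD jobs i [])) with
  | some i => jobs.modify i.toNat (fun job => job ++ [p])  -- jobs[i].append([module, count]); i ∈ range(num_jobs), so i ≥ 0 and toNat is exact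
  | none => jobs  -- min() over empty range: Python raises ValueError; excluded by Pre_

def split_modules (modules : List (String × Int)) (num_jobs : Int) : List (List (String × Int)) :=
  let ms := PySem.List.sorted modules (fun x => x.2) true
  let jobs0 : List (List (String × Int)) := (PySem.List.pyRange 0 num_jobs 1).map (fun _ => [])
  ms.foldl (pvStepA num_jobs) jobs0

-- ===== PORT B =====
-- _insert(queue, item): scan for the first position whose element exceeds item (tuple order),
-- insert there, else append; transcribed as the structural recursion doing exactly that scan.
def pvInsertQ (queue : List (Int × Int)) (item : Int × Int) : List (Int × Int) :=
  match queue with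
  | [] => [item]
  | x :: t =>
    if item.1 < x.1 ∨ (item.1 = x.1 ∧ item.2 < x.2)  -- item < queue[pos] on int pairs
    then item :: x :: t
    else x :: pvInsertQ t item

-- the body of B's for-loop: s, i = queue[0]; queue = _insert(queue[1:], (s+count, i)); append
def pvStepB (st : List (List (String × Int)) × List (Int × Int)) (p : String × Int) :
    List (List (String × Int)) × List (Int × Int) :=
  match st.2 with
  | [] => st  -- queue[0] of an empty queue: Python raises IndexError; excluded by Pre_
  | (s, i) :: rest =>
    (st.1.modify i.toNat (fun job => job ++ [p]), pvInsertQ rest (s + p.2, i))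

def split_modules_alt (modules : List (String × Int)) (num_jobs : Int) : List (List (String × Int)) :=
  let ms := PySem.List.sorted modules (fun x => x.2) true
  let jobs0 : List (List (String × Int)) := (PySem.List.pyRange 0 num_jobs 1).map (fun _ => [])
  let q0 : List (Int × Int) := (PySem.List.pyRange 0 num_jobs 1).map (fun i => ((0 : Int), i))
  (ms.foldl pvStepB (jobs0, q0)).1

-- ===== PRECONDITION & SPEC =====
-- Pre_ excludes exactly the inputs where both Pythons raise (A: ValueError from min() of an
-- empty sequence; B: IndexError from queue[0] on the empty queue): a nonempty module list with
-- num_jobs ≤ 0.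
def Pre_split_modules (modules : List (String × Int)) (num_jobs : Int) : Prop :=
  modules = [] ∨ 1 ≤ num_jobs
instance (modules : List (String × Int)) (num_jobs : Int) : Decidable (Pre_split_modules modules num_jobs) := by unfold Pre_split_modules; infer_instance

def pvWitness_split_modules : (List (String × Int)) × Int := ([("pcap", 3), ("fmc", 1)], 2)

def Spec_split_modules (modules : List (String × Int)) (num_jobs : Int) (out : List (List (String × Int))) : Prop := out = split_modules_alt modules num_jobs
instance (modules : List (String × Int)) (num_jobs : Int) (out : List (List (String × Int))) : Decidable (Spec_split_modules modules num_jobs out) := by unfold Spec_split_modules; infer_instance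

-- ===== CLAIM (what is proved, stated in full; the proofs are below) =====
def Claim_equal_split_modules : Prop := ∀ (modules : List (String × Int)) (num_jobs : Int), Dom_split_modules modules num_jobs → Pre_split_modules modules num_jobs → Spec_split_modules modules num_jobs (split_modules modules num_jobs)

-- ===== LEMMAS AND PROOFS =====

-- strict tuple order on (sum, index) pairs, as B's insertion test uses it
def pvLexLt (a b : Int × Int) : Prop := a.1 < b.1 ∨ (a.1 = b.1 ∧ a.2 < b.2)

-- the (running_sum, index) pair of job j
def pvJobKey (jobs : List (List (String × Int))) (j : Nat) : Int × Int :=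
  (pvSumSnd (jobs.getD j []), (j : Int))

-- the multiset B's queue must equal: one pair per job
def pvKeys (n : Nat) (jobs : List (List (String × Int))) : List (Int × Int) :=
  (List.range n).map (pvJobKey jobs)

-- min? (l ++ [b]) in terms of min? l
theorem pv_min?_append_singleton {α : Type} (key : α → Int) (l : List α) (b : α) :
    PySem.List.min? (l ++ [b]) key =
      (match PySem.List.min? l key with
       | none => some b
       | some m => if key b < key m then some b else some m) := by
  simp only [PySem.List.min?, List.foldl_append, List.foldl_cons, List.foldl_nil]
  rfl

-- min? returns the FIRST element achieving the minimum key
theorem pv_min?_first_argmin {α : Type} (key : α → Int) :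
    ∀ (xs : List α), xs ≠ [] → ∃ (k : Nat) (hk : k < xs.length),
      PySem.List.min? xs key = some xs[k] ∧
      (∀ (j : Nat) (hj : j < xs.length), key xs[k] ≤ key xs[j]) ∧
      (∀ (j : Nat) (hj : j < k), key xs[k] < key xs[j]) := by
  intro xs
  induction xs using List.reverseRecOn with
  | nil => intro h; exact absurd rfl h
  | append_singleton l b ih =>
    intro _
    by_cases hl : l = []
    · subst hl
      refine ⟨0, by simp, by simp [PySem.List.min?], ?_, fun j hj => absurd hj (by omega)⟩
      intro j hj
      have hj0 : j = 0 := by simp at hj; omega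
      subst hj0
      exact le_refl _
    · obtain ⟨k, hk, hmin, hle, hlt⟩ := ih hl
      by_cases hb : key b < key (l[k])
      · refine ⟨l.length, by simp, ?_, ?_, ?_⟩
        · rw [pv_min?_append_singleton, hmin, List.getElem_concat_length rfl]
          simp [hb]
        · intro j hj
          rw [List.getElem_concat_length rfl]
          rcases Nat.lt_or_ge j l.length with hj' | hj'
          · rw [List.getElem_append_left hj']
            exact le_of_lt (lt_of_lt_of_le hb (hle j hj'))
          · have hjl : j = l.length := by simp at hj; omega
            subst hjl
            rw [List.getElem_concat_length rfl]
        · intro j hj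
          rw [List.getElem_concat_length rfl, List.getElem_append_left hj]
          exact lt_of_lt_of_le hb (hle j hj)
      · refine ⟨k, by simp; omega, ?_, ?_, ?_⟩
        · rw [pv_min?_append_singleton, hmin, List.getElem_append_left hk]
          simp [hb]
        · intro j hj
          rw [List.getElem_append_left hk]
          rcases Nat.lt_or_ge j l.length with hj' | hj'
          · rw [List.getElem_append_left hj']
            exact hle j hj'
          · have hjl : j = l.length := by simp at hj; omega
            subst hjl
            rw [List.getElem_concat_length rfl]
            exact le_of_not_gt hb
        · intro j hj
          rw [List.getElem_append_left hk, List.getElem_append_left (Nat.lt_trans hj hk)]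
          exact hlt j hj

-- appending one pair bumps the running sum by its count
theorem pvSumSnd_append (l : List (String × Int)) (p : String × Int) :
    pvSumSnd (l ++ [p]) = pvSumSnd l + p.2 := by
  simp [pvSumSnd, List.foldl_append]

-- ordered insert is a permutation of consing
theorem pv_insertQ_perm (l : List (Int × Int)) (item : Int × Int) :
    (pvInsertQ l item).Perm (item :: l) := by
  induction l with
  | nil => simp [pvInsertQ]
  | cons x t ih =>
    unfold pvInsertQ
    split_ifs
    · exact List.Perm.refl _
    · exact (ih.cons x).trans (List.Perm.swap _ _ _)

-- ordered insert keeps the queue strictly sorted, provided the new index is fresh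
theorem pv_insertQ_pairwise (l : List (Int × Int)) (item : Int × Int)
    (hpw : l.Pairwise pvLexLt) (hfresh : ∀ x ∈ l, x.2 ≠ item.2) :
    (pvInsertQ l item).Pairwise pvLexLt := by
  induction l with
  | nil => simp [pvInsertQ]
  | cons x t ih =>
    rw [List.pairwise_cons] at hpw
    obtain ⟨hx, ht⟩ := hpw
    unfold pvInsertQ
    split_ifs with h
    · refine List.Pairwise.cons ?_ (List.Pairwise.cons hx ht)
      intro y hy
      rcases List.mem_cons.mp hy with hy | hy
      · subst hy; exact h
      · rcases h with h | h
        · rcases hx y hy with h' | h'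
          · exact Or.inl (by omega)
          · exact Or.inl (by omega)
        · rcases hx y hy with h' | h'
          · exact Or.inl (by omega)
          · exact Or.inr ⟨by omega, by omega⟩
    · refine List.Pairwise.cons ?_ (ih ht (fun y hy => hfresh y (List.mem_cons_of_mem x hy)))
      intro y hy
      have hy' : y ∈ item :: t := (pv_insertQ_perm t item).mem_iff.mp hy
      rcases List.mem_cons.mp hy' with hy' | hy'
      · subst hy'
        have hne : x.2 ≠ y.2 := hfresh x (List.mem_cons_self)
        unfold pvLexLt
        omega
      · exact hx y hy'

-- one loop iteration: popping B's sorted queue picks the same job as A's recomputed argmin,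
-- and the re-inserted pair keeps the queue equal (as a sorted multiset) to the job sums
theorem pv_step_bridge (num_jobs : Int) (h1 : 1 ≤ num_jobs)
    (jobs : List (List (String × Int))) (q : List (Int × Int)) (p : String × Int)
    (hlen : jobs.length = num_jobs.toNat)
    (hpw : q.Pairwise pvLexLt)
    (hperm : q.Perm (pvKeys num_jobs.toNat jobs)) :
    pvStepB (jobs, q) p =
      (pvStepA num_jobs jobs p, (pvStepB (jobs, q) p).2) ∧
    (pvStepA num_jobs jobs p).length = num_jobs.toNat ∧
    (pvStepB (jobs, q) p).2.Pairwise pvLexLt ∧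
    (pvStepB (jobs, q) p).2.Perm (pvKeys num_jobs.toNat (pvStepA num_jobs jobs p)) := by
  have hn1 : 1 ≤ num_jobs.toNat := by omega
  have hqlen : q.length = num_jobs.toNat := by
    rw [hperm.length_eq]; simp [pvKeys]
  match hq : q with
  | [] => simp at hqlen; omega
  | (s, i) :: rest =>
  subst hq
  rw [List.pairwise_cons] at hpw
  obtain ⟨hhead, hpwrest⟩ := hpw
  -- identify the head as the pair of some job k
  have hmem : (s, i) ∈ pvKeys num_jobs.toNat jobs := hperm.mem_iff.mp List.mem_cons_self
  obtain ⟨k, hkr, hkey⟩ := List.mem_map.mp hmem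
  have hk : k < num_jobs.toNat := List.mem_range.mp hkr
  have hs : s = pvSumSnd (jobs.getD k []) := by
    have := congrArg Prod.fst hkey; simpa [pvJobKey] using this.symm
  have hi : i = (k : Int) := by
    have := congrArg Prod.snd hkey; simpa [pvJobKey] using this.symm
  -- the tail is the pairs of the other jobs
  have hLperm : rest.Perm (((List.range num_jobs.toNat).erase k).map (pvJobKey jobs)) := by
    have h1' : (pvKeys num_jobs.toNat jobs).Perm
        (pvJobKey jobs k :: ((List.range num_jobs.toNat).erase k).map (pvJobKey jobs)) := by
      simpa [pvKeys] using (List.perm_cons_erase hkr).map (pvJobKey jobs)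
    have h2' : ((s, i) :: rest).Perm
        ((s, i) :: ((List.range num_jobs.toNat).erase k).map (pvJobKey jobs)) := by
      rw [hkey] at h1'
      exact hperm.trans h1'
    exact h2'.cons_inv
  -- every tail pair belongs to a job j ≠ k
  have htail : ∀ x ∈ rest, ∃ j, j < num_jobs.toNat ∧ j ≠ k ∧ x = pvJobKey jobs j := by
    intro x hx
    have := hLperm.mem_iff.mp hx
    obtain ⟨j, hjr, hjx⟩ := List.mem_map.mp this
    rw [(List.nodup_range).mem_erase_iff] at hjr
    exact ⟨j, List.mem_range.mp hjr.2, hjr.1, hjx.symm⟩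
  -- the head is the first argmin of the job sums
  have hminle : ∀ j, j < num_jobs.toNat →
      pvSumSnd (jobs.getD k []) ≤ pvSumSnd (jobs.getD j []) := by
    intro j hj
    by_cases hjk : j = k
    · subst hjk; exact le_refl _
    · have hjq : pvJobKey jobs j ∈ ((List.range num_jobs.toNat).erase k).map (pvJobKey jobs) :=
        List.mem_map.mpr ⟨j, (List.nodup_range).mem_erase_iff.mpr ⟨hjk, List.mem_range.mpr hj⟩, rfl⟩
      have := hhead _ (hLperm.symm.mem_iff.mp hjq)
      rcases this with h | h
      · simp only [pvJobKey] at h; omega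
      · simp only [pvJobKey] at h; omega
  have hminlt : ∀ j, j < k →
      pvSumSnd (jobs.getD k []) < pvSumSnd (jobs.getD j []) := by
    intro j hj
    have hjk : j ≠ k := by omega
    have hjq : pvJobKey jobs j ∈ ((List.range num_jobs.toNat).erase k).map (pvJobKey jobs) :=
      List.mem_map.mpr ⟨j, (List.nodup_range).mem_erase_iff.mpr ⟨hjk, List.mem_range.mpr (by omega)⟩, rfl⟩
    have := hhead _ (hLperm.symm.mem_iff.mp hjq)
    rcases this with h | h
    · simp only [pvJobKey] at h; omega
    · simp only [pvJobKey] at h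
      exfalso
      have : (k : Int) < (j : Int) := by omega
      omega
  -- A picks the same job k
  have hrlen : (PySem.List.pyRange 0 num_jobs 1).length = num_jobs.toNat := by
    rw [PySem.List.length_pyRange_one]; omega
  have hrne : PySem.List.pyRange 0 num_jobs 1 ≠ [] := by
    intro h
    have := congrArg List.length h
    rw [hrlen] at this; simp at this; omega
  obtain ⟨k', hk', hminA, hleA, hltA⟩ :=
    pv_min?_first_argmin (fun i => pvSumSnd (PySem.List.pyGetD jobs i [])) _ hrne
  have hk'n : k' < num_jobs.toNat := by rwa [hrlen] at hk'
  have hAkey : ∀ (j : Nat) (hj : j < num_jobs.toNat),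
      pvSumSnd (PySem.List.pyGetD jobs ((PySem.List.pyRange 0 num_jobs 1)[j]'(by omega)) []) =
        pvSumSnd (jobs.getD j []) := by
    intro j hj
    have hgj : (PySem.List.pyRange 0 num_jobs 1)[j]'(by omega) = (j : Int) := by
      rw [PySem.List.getElem_pyRange_one]; omega
    rw [hgj, PySem.List.pyGetD_natCast]
  have hkk' : k' = k := by
    by_contra hne
    rcases Nat.lt_or_ge k' k with h | h
    · have h1' := hminlt k' h
      have h2' := hleA k (by omega)
      rw [hAkey k' hk'n, hAkey k hk] at h2'
      omega
    · have h : k < k' := by omega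
      have h1' := hltA k (by omega)
      rw [hAkey k' hk'n, hAkey k hk] at h1'
      have h2' := hminle k' hk'n
      omega
  have hgetk : (PySem.List.pyRange 0 num_jobs 1)[k']'hk' = (k : Int) := by
    rw [PySem.List.getElem_pyRange_one]; omega
  have hA : pvStepA num_jobs jobs p = jobs.modify k (fun job => job ++ [p]) := by
    unfold pvStepA
    rw [hminA, hgetk]
    simp
  -- B pops the head and appends to the same job
  have hB1 : (pvStepB (jobs, (s, i) :: rest) p).1 = jobs.modify k (fun job => job ++ [p]) := by
    simp [pvStepB, hi]
  have hB2 : (pvStepB (jobs, (s, i) :: rest) p).2 = pvInsertQ rest (s + p.2, i) := by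
    simp [pvStepB]
  -- freshness of index k in the tail
  have hfresh : ∀ x ∈ rest, x.2 ≠ (s + p.2, i).2 := by
    intro x hx
    obtain ⟨j, hj, hjk, hxj⟩ := htail x hx
    subst hxj
    simp only [pvJobKey, hi]
    exact fun hc => hjk (by exact_mod_cast hc)
  refine ⟨?_, ?_, ?_, ?_⟩
  · refine Prod.ext_iff.mpr ⟨?_, rfl⟩
    rw [hB1, hA]
  · rw [hA]; simp [hlen]
  · rw [hB2]
    exact pv_insertQ_pairwise rest _ hpwrest hfresh
  · rw [hB2, hA]
    -- new key of job k
    have hknew : pvJobKey (jobs.modify k (fun job => job ++ [p])) k = (s + p.2, i) := by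
      simp only [pvJobKey, hi, hs]
      have hkl : k < jobs.length := by omega
      rw [List.getD_eq_getElem _ _ (by simpa using hkl), List.getD_eq_getElem _ _ hkl]
      rw [List.getElem_modify]
      simp [pvSumSnd_append]
    -- other keys unchanged
    have hothers : (((List.range num_jobs.toNat).erase k).map
          (pvJobKey (jobs.modify k (fun job => job ++ [p])))) =
        (((List.range num_jobs.toNat).erase k).map (pvJobKey jobs)) := by
      apply List.map_congr_left
      intro j hj
      rw [(List.nodup_range).mem_erase_iff] at hj
      obtain ⟨hjk, hjr⟩ := hj
      have hjn : j < num_jobs.toNat := List.mem_range.mp hjr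
      simp only [pvJobKey]
      have hjl : j < jobs.length := by omega
      rw [List.getD_eq_getElem _ _ (by simpa using hjl), List.getD_eq_getElem _ _ hjl]
      rw [List.getElem_modify]
      simp [Ne.symm hjk]
    have hnewperm : (pvKeys num_jobs.toNat (jobs.modify k (fun job => job ++ [p]))).Perm
        ((s + p.2, i) :: ((List.range num_jobs.toNat).erase k).map (pvJobKey jobs)) := by
      have := (List.perm_cons_erase hkr).map (pvJobKey (jobs.modify k (fun job => job ++ [p])))
      rw [List.map_cons, hknew, hothers] at this
      simpa [pvKeys] using this
    exact ((pv_insertQ_perm rest (s + p.2, i)).trans (hLperm.cons _)).trans hnewperm.symm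

-- the whole loop: B's (jobs, queue) state projects onto A's jobs state
theorem pv_foldl_bridge (num_jobs : Int) (h1 : 1 ≤ num_jobs) :
    ∀ (ms : List (String × Int)) (jobs : List (List (String × Int))) (q : List (Int × Int)),
      jobs.length = num_jobs.toNat → q.Pairwise pvLexLt →
      q.Perm (pvKeys num_jobs.toNat jobs) →
      (ms.foldl pvStepB (jobs, q)).1 = ms.foldl (pvStepA num_jobs) jobs := by
  intro ms
  induction ms with
  | nil => intro jobs q _ _ _; rfl
  | cons p t ih =>
    intro jobs q hlen hpw hperm
    obtain ⟨hstep, hlen', hpw', hperm'⟩ := pv_step_bridge num_jobs h1 jobs q p hlen hpw hperm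
    simp only [List.foldl_cons]
    rw [hstep]
    exact ih _ _ hlen' hpw' hperm'

-- ===== VERDICT (by name: the statement is the Claim_ definition above) =====
theorem split_modules_spec : Claim_equal_split_modules := by
  intro modules num_jobs _ hpre
  show split_modules modules num_jobs = split_modules_alt modules num_jobs
  by_cases h1 : 1 ≤ num_jobs
  · unfold split_modules split_modules_alt
    simp only
    apply Eq.symm
    apply pv_foldl_bridge num_jobs h1
    · simp [PySem.List.length_pyRange_one]
    · exact (PySem.List.pairwise_lt_pyRange_one 0 num_jobs).map _
        (fun a b hab => Or.inr ⟨rfl, hab⟩)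
    · have hq0 : (PySem.List.pyRange 0 num_jobs 1).map (fun i => ((0 : Int), i)) =
          pvKeys num_jobs.toNat
            ((PySem.List.pyRange 0 num_jobs 1).map (fun _ => ([] : List (String × Int)))) := by
        apply List.ext_getElem
        · simp [pvKeys, PySem.List.length_pyRange_one]
        · intro kk h1k h2k
          simp only [pvKeys, List.getElem_map, List.getElem_range]
          rw [PySem.List.getElem_pyRange_one]
          simp [pvJobKey, pvSumSnd]
      rw [hq0]
  · have hm : modules = [] := by
      rcases hpre with h | h
      · exact h
      · exact absurd h h1
    subst hm
    rfl
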